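-- pv_equiv track=rewrite | github.com/petervn9/English-for-To | OptionB_000_Main_R1.3.py | _abs_to_index
-- ===== SOURCE A (Python) =====
-- def _abs_to_index(abspos: int, full_text: str) -> str:
--     lines = full_text.split("\n")
--     acc = 0
--     for i, l in enumerate(lines, start=1):
--         if acc + len(l) >= abspos:
--             return f"{i}.{abspos - acc}"
--         acc += len(l) + 1
--     return f"{len(lines)}.{len(lines[-1]) if lines else 0}"
-- ===== SOURCE B (Python) =====
-- def _abs_to_index(abspos: int, full_text: str) -> str:
--     pos = min(abspos, len(full_text))
--     head = full_text[:max(pos, 0)]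
--     line = head.count("\n") + 1
--     col = pos - (head.rfind("\n") + 1)
--     return f"{line}.{col}"
-- ===== Notes on version B (the rewrite author's own statement) =====
-- stated objective: idiomatic
-- what changed: Replaces A's split-into-lines-and-accumulate loop (with an early return and a separate fallback branch) by two direct string searches on the clamped prefix: line = head.count(' ')+1 and column = pos - (head.rfind(' ')+1).
import Mathlib
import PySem

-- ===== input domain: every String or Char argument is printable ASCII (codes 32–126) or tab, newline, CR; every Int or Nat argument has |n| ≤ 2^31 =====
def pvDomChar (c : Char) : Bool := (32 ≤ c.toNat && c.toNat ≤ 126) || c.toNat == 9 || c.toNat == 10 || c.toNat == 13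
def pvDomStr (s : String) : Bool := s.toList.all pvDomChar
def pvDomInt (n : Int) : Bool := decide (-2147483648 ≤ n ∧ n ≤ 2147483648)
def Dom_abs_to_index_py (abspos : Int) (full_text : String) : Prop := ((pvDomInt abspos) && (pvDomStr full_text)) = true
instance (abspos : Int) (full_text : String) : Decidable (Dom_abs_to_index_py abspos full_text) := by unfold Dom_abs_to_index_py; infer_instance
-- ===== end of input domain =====

-- B replaces A's split-into-lines accumulate loop by two direct searches (count / rfind) on the clamped prefix; proved to return the same string on all inputs.


-- ===== PORT A =====
-- the 'for i, l in enumerate(lines, start=1)' loop with accumulator acc; none = the loop fell through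
def pvLoopA (abspos : Int) : List (List Char) → Int → Int → Option (List Char)
  | [], _, _ => none
  | l :: rest, i, acc =>
    if abspos ≤ acc + (l.length : Int) then
      some (PySem.Int.toChars i ++ '.' :: PySem.Int.toChars (abspos - acc))
    else pvLoopA abspos rest (i + 1) (acc + (l.length : Int) + 1)

def abs_to_index_py (abspos : Int) (full_text : String) : String :=
  let lines := PySem.Chars.splitOn full_text.toList ['\n']
  match pvLoopA abspos lines 1 0 with
  | some r => String.ofList r
  | none =>
      -- f"{len(lines)}.{len(lines[-1]) if lines else 0}"
      String.ofList (PySem.Int.toChars (lines.length : Int) ++ '.' ::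
        PySem.Int.toChars (match PySem.List.pyGet? lines (-1) with
          | some last => (last.length : Int)
          | none => 0))

-- ===== PORT B =====
def abs_to_index_py_alt (abspos : Int) (full_text : String) : String :=
  let s := full_text.toList
  let pos : Int := min abspos (s.length : Int)
  let head := PySem.Chars.slice s none (some (max pos 0))
  String.ofList (PySem.Int.toChars ((PySem.Chars.count head ['\n'] : Int) + 1) ++
    '.' :: PySem.Int.toChars (pos - (PySem.Chars.rfind head ['\n'] + 1)))

-- ===== PRECONDITION & SPEC =====
def Spec_abs_to_index_py (abspos : Int) (full_text : String) (out : String) : Prop := out = abs_to_index_py_alt abspos full_text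
instance (abspos : Int) (full_text : String) (out : String) : Decidable (Spec_abs_to_index_py abspos full_text out) := by unfold Spec_abs_to_index_py; infer_instance

-- ===== CLAIM (what is proved, stated in full; the proofs are below) =====
def Claim_equal_abs_to_index_py : Prop := ∀ (abspos : Int) (full_text : String), Dom_abs_to_index_py abspos full_text → Spec_abs_to_index_py abspos full_text (abs_to_index_py abspos full_text)

-- ===== LEMMAS AND PROOFS =====

-- structural version of full_text.split("\n")
def mySplit : List Char → List Char → List (List Char)
  | pre, [] => [pre]
  | pre, c :: rest => if c = '\n' then pre :: mySplit [] rest else mySplit (pre ++ [c]) rest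

-- length of the segment after the last '\n'
def trail (s : List Char) : Nat := (s.reverse.takeWhile (fun c => c != '\n')).length

theorem isPrefixOf_nl (l : List Char) :
    ['\n'].isPrefixOf l = match l with | [] => false | c :: _ => c == '\n' := by
  cases l <;> simp [List.isPrefixOf, eq_comm]

theorem splitOn_go_eq (l : List Char) : ∀ (fuel : Nat) (cur : List Char) (acc : List (List Char)),
    l.length ≤ fuel →
    PySem.Chars.splitOn.go ['\n'] fuel l cur acc = acc.reverse ++ mySplit cur.reverse l := by
  induction l with
  | nil =>
    intro fuel cur acc _
    cases fuel <;> simp [PySem.Chars.splitOn.go, mySplit]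
  | cons c rest ih =>
    intro fuel cur acc hf
    cases fuel with
    | zero => simp at hf
    | succ f =>
      rw [PySem.Chars.splitOn.go]
      by_cases hc : c = '\n'
      · subst hc
        simp [ih f [] (cur.reverse :: acc) (by simpa using hf), mySplit]
      · simp only [isPrefixOf_nl]
        rw [if_neg (by simp [hc])]
        rw [ih f (c :: cur) acc (by simpa using hf)]
        simp [mySplit, hc]

theorem splitOn_eq (cs : List Char) : PySem.Chars.splitOn cs ['\n'] = mySplit [] cs := by
  rw [PySem.Chars.splitOn, splitOn_go_eq cs (cs.length+1) [] [] (by omega)]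
  simp

theorem count_go_eq (s : List Char) : ∀ (fuel acc : Nat), s.length ≤ fuel →
    PySem.Chars.count.go ['\n'] fuel s acc = acc + s.count '\n' := by
  induction s with
  | nil => intro fuel acc _; cases fuel <;> simp [PySem.Chars.count.go]
  | cons c rest ih =>
    intro fuel acc hf
    cases fuel with
    | zero => simp at hf
    | succ f =>
      rw [PySem.Chars.count.go]
      simp only [isPrefixOf_nl]
      by_cases hc : c = '\n'
      · subst hc
        rw [if_pos (by simp)]
        simp only [List.length_cons, List.length_nil, List.drop_succ_cons, List.drop_zero]
        rw [ih f (acc+1) (by simpa using hf)]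
        simp; omega
      · rw [if_neg (by simp [hc])]
        rw [ih f acc (by simpa using hf)]
        simp [hc]

theorem count_nl (s : List Char) : PySem.Chars.count s ['\n'] = s.count '\n' := by
  rw [PySem.Chars.count]
  simp [count_go_eq s s.length 0 (le_refl _)]

-- trail of a '\n'-free list is its length

theorem dropWhile_head_false {p : Char → Bool} {l : List Char} {c : Char} {cs : List Char}
    (h : l.dropWhile p = c :: cs) : p c = false := by
  induction l with
  | nil => simp at h
  | cons a t ih =>
    rw [List.dropWhile_cons] at h
    split at h
    · exact ih h
    · next hpa => cases h; simpa using hpa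

theorem trail_no_nl (s : List Char) (h : '\n' ∉ s) : trail s = s.length := by
  unfold trail
  rw [List.takeWhile_eq_self_iff.mpr]
  · simp
  · intro c hc; simp at hc ⊢; rintro rfl; exact h hc

theorem trail_append (a b : List Char) : trail (a ++ '\n' :: b) = trail b := by
  unfold trail
  simp only [List.reverse_append, List.reverse_cons]
  rw [List.append_assoc, List.takeWhile_append]
  split_ifs with h
  · have h0 : List.takeWhile (fun c => c != '\n') ('\n' :: a.reverse) = [] := by
      simp [List.takeWhile]
    simp [h0]
    simpa using h.symm
  · rfl

theorem mySplit_no_nl (l : List Char) : ∀ pre, '\n' ∉ l → mySplit pre l = [pre ++ l] := by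
  induction l with
  | nil => intro pre _; simp [mySplit]
  | cons c rest ih =>
    intro pre h
    rw [mySplit, if_neg (by intro hc; exact h (by simp [hc]))]
    rw [ih _ (by intro hc; exact h (List.mem_cons_of_mem _ hc))]
    simp

theorem mySplit_append (a : List Char) : ∀ pre (b : List Char), '\n' ∉ a →
    mySplit pre (a ++ '\n' :: b) = (pre ++ a) :: mySplit [] b := by
  induction a with
  | nil => intro pre b _; simp [mySplit]
  | cons c rest ih =>
    intro pre b h
    simp only [List.cons_append]
    rw [mySplit, if_neg (by intro hc; exact h (by simp [hc]))]
    rw [ih _ _ (by intro hc; exact h (List.mem_cons_of_mem _ hc))]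
    simp

theorem getLast?_cons_ne (a : List Char) (t : List (List Char)) (h : t ≠ []) :
    (a :: t).getLast? = t.getLast? := by
  cases t with
  | nil => exact absurd rfl h
  | cons x xs => exact List.getLast?_cons_cons

theorem nl_decomp (cs : List Char) (hm : '\n' ∈ cs) :
    ∃ a b, cs = a ++ '\n' :: b ∧ '\n' ∉ a := by
  have hdr : cs.dropWhile (fun c => c != '\n') ≠ [] := by
    intro h
    rw [List.dropWhile_eq_nil_iff] at h
    have := h '\n' hm
    simp at this
  obtain ⟨c, u, hcu⟩ := List.exists_cons_of_ne_nil hdr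
  have hc : c = '\n' := by simpa using dropWhile_head_false hcu
  subst hc
  refine ⟨cs.takeWhile (fun c => c != '\n'), u, ?_, ?_⟩
  · rw [← hcu, List.takeWhile_append_dropWhile]
  · intro hmem
    have := List.mem_takeWhile_imp (p := fun c => c != ('\n' : Char)) hmem
    simp at this

theorem mySplit_ne_nil (l : List Char) : ∀ pre, mySplit pre l ≠ [] := by
  induction l with
  | nil => intro pre; simp [mySplit]
  | cons c rest ih =>
    intro pre
    rw [mySplit]
    split_ifs
    · simp
    · exact ih _

theorem mySplit_length : ∀ (n : Nat) (cs : List Char), cs.length ≤ n →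
    (mySplit [] cs).length = cs.count '\n' + 1 := by
  intro n
  induction n with
  | zero =>
    intro cs h
    have : cs = [] := by cases cs <;> simp_all
    subst this; simp [mySplit]
  | succ n ih =>
    intro cs h
    by_cases hm : '\n' ∈ cs
    · obtain ⟨a, b, rfl, ha⟩ := nl_decomp cs hm
      rw [mySplit_append a [] b ha]
      simp only [List.length_cons, List.nil_append]
      rw [ih b (by simp at h; omega)]
      rw [List.count_append, List.count_cons]
      have : a.count '\n' = 0 := List.count_eq_zero.mpr ha
      simp [this]
    · rw [mySplit_no_nl cs [] hm]
      have : cs.count '\n' = 0 := List.count_eq_zero.mpr hm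
      simp [this]

theorem mySplit_getLast : ∀ (n : Nat) (cs : List Char), cs.length ≤ n →
    ∃ l, (mySplit [] cs).getLast? = some l ∧ l.length = trail cs := by
  intro n
  induction n with
  | zero =>
    intro cs h
    have : cs = [] := by cases cs <;> simp_all
    subst this
    exact ⟨[], by simp [mySplit], by simp [trail]⟩
  | succ n ih =>
    intro cs h
    by_cases hm : '\n' ∈ cs
    · obtain ⟨a, b, rfl, ha⟩ := nl_decomp cs hm
      obtain ⟨l, hl, hlen⟩ := ih b (by simp at h; omega)
      refine ⟨l, ?_, by rw [hlen, trail_append]⟩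
      rw [mySplit_append a [] b ha]
      rw [getLast?_cons_ne _ _ (mySplit_ne_nil b [])]
      exact hl
    · rw [mySplit_no_nl cs [] hm]
      exact ⟨cs, by simp, (trail_no_nl cs hm).symm⟩

theorem loopA_le (cs : List Char) (p i acc : Int) (h : p ≤ acc) :
    pvLoopA p (mySplit [] cs) i acc =
      some (PySem.Int.toChars i ++ '.' :: PySem.Int.toChars (p - acc)) := by
  cases hsp : mySplit [] cs with
  | nil => exact absurd hsp (mySplit_ne_nil cs [])
  | cons l rest =>
    rw [pvLoopA, if_pos (by omega)]

theorem loopA_some : ∀ (n : Nat) (cs : List Char), cs.length ≤ n →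
    ∀ (p i acc : Int), acc ≤ p → p ≤ acc + (cs.length : Int) →
    pvLoopA p (mySplit [] cs) i acc =
      some (PySem.Int.toChars (i + ((cs.take (p - acc).toNat).count '\n' : Int)) ++
        '.' :: PySem.Int.toChars ((trail (cs.take (p - acc).toNat) : Int))) := by
  intro n
  induction n with
  | zero =>
    intro cs hn p i acc h0 h1
    have : cs = [] := by cases cs <;> simp_all
    subst this
    simp only [List.length_nil, Int.natCast_zero, add_zero] at h1
    have hpa : p = acc := le_antisymm h1 h0
    subst hpa
    rw [loopA_le [] p i p (le_refl _)]
    simp [trail]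
  | succ n ih =>
    intro cs hn p i acc h0 h1
    by_cases hm : '\n' ∈ cs
    · obtain ⟨a, b, rfl, ha⟩ := nl_decomp cs hm
      rw [mySplit_append a [] b ha, List.nil_append]
      rw [pvLoopA]
      by_cases hle : p ≤ acc + (a.length : Int)
      · rw [if_pos hle]
        have hq : (p - acc).toNat ≤ a.length := by omega
        have htake : (a ++ '\n' :: b).take (p - acc).toNat = a.take (p - acc).toNat := by
          rw [List.take_append]
          rw [Nat.sub_eq_zero_of_le hq]
          simp
        rw [htake]
        have hnonl : '\n' ∉ a.take (p - acc).toNat := fun hc => ha (List.mem_of_mem_take hc)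
        have hcnt : (a.take (p - acc).toNat).count '\n' = 0 := List.count_eq_zero.mpr hnonl
        rw [hcnt, trail_no_nl _ hnonl]
        have hlt : (a.take (p - acc).toNat).length = (p - acc).toNat := by
          simp [List.length_take]; omega
        rw [hlt]
        have : ((p - acc).toNat : Int) = p - acc := by omega
        rw [this]
        simp
      · rw [if_neg hle]
        have hblen : b.length ≤ n := by simp at hn; omega
        rw [ih b hblen p (i+1) (acc + a.length + 1) (by omega) (by simp at h1 ⊢; omega)]
        have hq : (p - acc).toNat = a.length + 1 + (p - (acc + a.length + 1)).toNat := by omega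
        have htake : (a ++ '\n' :: b).take (p - acc).toNat =
            a ++ '\n' :: b.take (p - (acc + a.length + 1)).toNat := by
          rw [hq, List.take_append]
          rw [List.take_of_length_le (by omega : a.length ≤ a.length + 1 + (p - (acc + a.length + 1)).toNat)]
          have h2 : a.length + 1 + (p - (acc + a.length + 1)).toNat - a.length
              = (p - (acc + a.length + 1)).toNat + 1 := by omega
          rw [h2, List.take_succ_cons]
        rw [htake, trail_append]
        have hcnt : (a ++ '\n' :: b.take (p - (acc + a.length + 1)).toNat).count '\n'
            = (b.take (p - (acc + a.length + 1)).toNat).count '\n' + 1 := by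
          rw [List.count_append, List.count_cons]
          have : a.count '\n' = 0 := List.count_eq_zero.mpr ha
          simp [this]
        rw [hcnt]
        congr 2
        congr 1
        push_cast
        omega
    · rw [mySplit_no_nl cs [] hm, List.nil_append]
      rw [pvLoopA, if_pos h1]
      have hq : (p - acc).toNat ≤ cs.length := by omega
      have hnonl : '\n' ∉ cs.take (p - acc).toNat := fun hc => hm (List.mem_of_mem_take hc)
      rw [List.count_eq_zero.mpr hnonl, trail_no_nl _ hnonl]
      have hlt : (cs.take (p - acc).toNat).length = (p - acc).toNat := by
        simp [List.length_take]; omega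
      rw [hlt]
      have : ((p - acc).toNat : Int) = p - acc := by omega
      rw [this]
      simp

theorem loopA_none : ∀ (n : Nat) (cs : List Char), cs.length ≤ n →
    ∀ (p i acc : Int), acc + (cs.length : Int) < p →
    pvLoopA p (mySplit [] cs) i acc = none := by
  intro n
  induction n with
  | zero =>
    intro cs hn p i acc h1
    have : cs = [] := by cases cs <;> simp_all
    subst this
    rw [mySplit, pvLoopA, if_neg (by simp at h1 ⊢; omega)]
    rfl
  | succ n ih =>
    intro cs hn p i acc h1
    by_cases hm : '\n' ∈ cs
    · obtain ⟨a, b, rfl, ha⟩ := nl_decomp cs hm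
      rw [mySplit_append a [] b ha, List.nil_append]
      rw [pvLoopA, if_neg (by simp at h1 ⊢; omega)]
      exact ih b (by simp at hn; omega) p (i+1) (acc + a.length + 1) (by simp at h1 ⊢; omega)
    · rw [mySplit_no_nl cs [] hm, List.nil_append]
      rw [pvLoopA, if_neg (by omega)]
      rfl

theorem rfind_go_none (s : List Char) : ∀ j : Nat,
    (∀ i : Nat, i ≤ j → ['\n'].isPrefixOf (s.drop i) = false) →
    PySem.Chars.rfind.go s ['\n'] j = -1 := by
  intro j
  induction j with
  | zero =>
    intro h
    have h0 := h 0 (le_refl 0)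
    rw [List.drop_zero] at h0
    rw [PySem.Chars.rfind.go, if_neg (by rw [h0]; simp)]
  | succ j ih =>
    intro h
    rw [PySem.Chars.rfind.go]
    rw [if_neg (by rw [h (j+1) (le_refl _)]; simp)]
    exact ih (fun i hi => h i (by omega))

theorem rfind_go_hit (s : List Char) : ∀ (j k : Nat), k ≤ j →
    ['\n'].isPrefixOf (s.drop k) = true →
    (∀ i : Nat, k < i → i ≤ j → ['\n'].isPrefixOf (s.drop i) = false) →
    PySem.Chars.rfind.go s ['\n'] j = (k : Int) := by
  intro j
  induction j with
  | zero =>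
    intro k hk hp _
    interval_cases k
    rw [List.drop_zero] at hp
    rw [PySem.Chars.rfind.go, if_pos hp]
    rfl
  | succ j ih =>
    intro k hk hp hno
    rw [PySem.Chars.rfind.go]
    by_cases hkj : k = j + 1
    · subst hkj; rw [if_pos hp]
    · rw [if_neg (by rw [hno (j+1) (by omega) (le_refl _)]; simp)]
      exact ih k (by omega) hp (fun i h1 h2 => hno i h1 (by omega))

theorem rfind_nl (s : List Char) :
    PySem.Chars.rfind s ['\n'] = (s.length : Int) - 1 - (trail s : Int) := by
  rw [PySem.Chars.rfind]
  by_cases hm : '\n' ∈ s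
  · have hdr : s.reverse.dropWhile (fun c => c != '\n') ≠ [] := by
      intro h
      rw [List.dropWhile_eq_nil_iff] at h
      have := h '\n' (by simpa using hm)
      simp at this
    obtain ⟨c, u, hcu⟩ := List.exists_cons_of_ne_nil hdr
    have hc : c = '\n' := by
      have := dropWhile_head_false hcu
      simpa using this
    subst hc
    set tw := (s.reverse.takeWhile (fun c => c != '\n')) with htw
    have hsplit : tw ++ '\n' :: u = s.reverse := by
      rw [htw, ← hcu]
      exact List.takeWhile_append_dropWhile
    have hs : s = u.reverse ++ '\n' :: tw.reverse := by
      have h2 := congrArg List.reverse hsplit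
      simpa using h2.symm
    have htr : trail s = tw.length := rfl
    have hlen : s.length = u.length + 1 + tw.length := by
      conv_lhs => rw [hs]; simp
      omega
    have htwf : ∀ x ∈ tw, (x != '\n') = true := fun x hx => List.mem_takeWhile_imp (p := fun c => c != ('\n' : Char)) hx
    have hk : ['\n'].isPrefixOf (s.drop u.length) = true := by
      conv_lhs => rw [hs]
      rw [List.drop_append, List.drop_eq_nil_of_le (by simp), Nat.sub_eq_zero_of_le (by simp)]
      simp
    have hno : ∀ i : Nat, u.length < i → i ≤ s.length → ['\n'].isPrefixOf (s.drop i) = false := by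
      intro i h1 h2
      conv_lhs => rw [hs]
      rw [List.drop_append, List.drop_eq_nil_of_le (by simp; omega)]
      have : i - u.reverse.length = (i - u.length - 1) + 1 := by simp; omega
      rw [this, List.drop_succ_cons]
      rw [isPrefixOf_nl]
      cases hd : tw.reverse.drop (i - u.length - 1) with
      | nil => simp
      | cons x xs =>
        have hx : x ∈ tw := by
          have : x ∈ tw.reverse.drop (i - u.length - 1) := by rw [hd]; exact List.mem_cons_self
          exact List.mem_reverse.mp (List.mem_of_mem_drop this)
        simp only [List.nil_append]
        have := htwf x hx
        simp at this ⊢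
        exact this
    rw [rfind_go_hit s s.length u.length (by omega) hk hno, htr]
    omega
  · rw [rfind_go_none]
    · have : trail s = s.length := by
        unfold trail
        rw [List.takeWhile_eq_self_iff.mpr]
        · simp
        · intro c hc; simp at hc ⊢; rintro rfl; exact hm (by simpa using hc)
      omega
    · intro i _
      rw [isPrefixOf_nl]
      cases hd : s.drop i with
      | nil => rfl
      | cons c t =>
        have hcm : c ∈ s := by
          have : c ∈ s.drop i := by rw [hd]; exact List.mem_cons_self
          exact List.mem_of_mem_drop this
        simp
        rintro rfl; exact hm hcm

theorem pyGet?_neg_one (xs : List (List Char)) (h : xs ≠ []) :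
    PySem.List.pyGet? xs (-1) = xs.getLast? := by
  have hl : 0 < xs.length := List.length_pos_iff.mpr h
  rw [PySem.List.pyGet?, PySem.List.pyIdx?]
  rw [if_neg (by omega), if_pos (by omega : -(xs.length:Int) ≤ -1)]
  simp [List.getLast?_eq_getElem?]

theorem slice_to_nat (s : List Char) (m : Int) (hm : 0 ≤ m) :
    PySem.Chars.slice s none (some m) = s.take m.toNat := by
  simp [PySem.Chars.slice_eq_listSlice, PySem.List.slice_to s hm]

-- ===== VERDICT (by name: the statement is the Claim_ definition above) =====
theorem abs_to_index_py_spec : Claim_equal_abs_to_index_py := by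
  intro abspos full_text _
  unfold Spec_abs_to_index_py abs_to_index_py abs_to_index_py_alt
  dsimp only
  set cs := full_text.toList with hcs
  rw [splitOn_eq]
  by_cases hneg : abspos ≤ 0
  · -- the first line already satisfies the loop test; B's head is the empty prefix
    rw [loopA_le cs abspos 1 0 hneg]
    rw [min_eq_left (by omega : abspos ≤ (cs.length : Int))]
    rw [max_eq_right (by omega : abspos ≤ 0)]
    rw [slice_to_nat cs 0 (le_refl _)]
    simp only [Int.toNat_zero, List.take_zero, count_nl, rfind_nl]
    norm_num [trail]
  · by_cases hle : abspos ≤ (cs.length : Int)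
    · -- in-range position: A's loop returns; B reads the prefix of length abspos
      rw [loopA_some cs.length cs (le_refl _) abspos 1 0 (by omega) (by omega)]
      rw [min_eq_left hle, max_eq_left (by omega : (0:Int) ≤ abspos)]
      rw [slice_to_nat cs abspos (by omega)]
      rw [count_nl, rfind_nl]
      have hlen : (cs.take abspos.toNat).length = abspos.toNat := by
        simp [List.length_take]; omega
      rw [hlen]
      simp only [sub_zero]
      congr 2
      · congr 1; omega
      · congr 2; omega
    · -- position past the end: A's loop falls through to the fallback
      rw [loopA_none cs.length cs (le_refl _) abspos 1 0 (by omega)]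
      rw [mySplit_length cs.length cs (le_refl _)]
      obtain ⟨l, hl, hlen⟩ := mySplit_getLast cs.length cs (le_refl _)
      rw [pyGet?_neg_one _ (mySplit_ne_nil cs []), hl]
      rw [min_eq_right (by omega : (cs.length : Int) ≤ abspos)]
      rw [max_eq_left (by omega : (0:Int) ≤ (cs.length : Int))]
      rw [slice_to_nat cs cs.length (by omega)]
      simp only [Int.toNat_natCast, List.take_length, count_nl, rfind_nl]
      congr 2
      congr 2
      rw [hlen]
      omega
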